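-- pv_equiv track=rewrite | github.com/KakumanuLakshmiNarayana/panchangam-agent | scripts/video_creator.py | telugu_tithi_full
-- ===== SOURCE A (Python) =====
-- TITHI_MAP = {
--     "Ekadashi":   "ఏకాదశి",   "Dwadashi":    "ద్వాదశి",
--     "Trayodashi": "త్రయోదశి", "Chaturdashi": "చతుర్దశి",
--     "Purnima":    "పూర్ణిమ",  "Amavasya":    "అమావాస్య",
--     "Pratipada":  "పాడ్యమి",  "Dwitiya":     "విదియ",
--     "Tritiya":    "తదియ",      "Chaturthi":   "చవితి",
--     "Panchami":   "పంచమి",     "Shashthi":    "షష్ఠి",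
--     "Saptami":    "సప్తమి",    "Ashtami":     "అష్టమి",
--     "Navami":     "నవమి",      "Dashami":     "దశమి",
-- }
--
-- def telugu_tithi_full(tithi_raw, tz=""):
--     """Convert tithi string to Telugu, strip tz, use | as separator."""
--     result = tithi_raw
--     if tz:
--         result = result.replace(f" {tz}", "")
--     for eng, tel in TITHI_MAP.items():
--         result = result.replace(eng, tel)
--     result = result.replace("upto", "వరకు").replace("Upto", "వరకు")
--     result = result.replace("\u2192", "|").replace("->", "|")
--     return result
-- ===== SOURCE B (Python) =====
-- TITHI_MAP = {
--     "Ekadashi":   "ఏకాదశి",   "Dwadashi":    "ద్వాదశి",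
--     "Trayodashi": "త్రయోదశి", "Chaturdashi": "చతుర్దశి",
--     "Purnima":    "పూర్ణిమ",  "Amavasya":    "అమావాస్య",
--     "Pratipada":  "పాడ్యమి",  "Dwitiya":     "విదియ",
--     "Tritiya":    "తదియ",      "Chaturthi":   "చవితి",
--     "Panchami":   "పంచమి",     "Shashthi":    "షష్ఠి",
--     "Saptami":    "సప్తమి",    "Ashtami":     "అష్టమి",
--     "Navami":     "నవమి",      "Dashami":     "దశమి",
-- }
--
-- _PAIRS = list(TITHI_MAP.items()) + [
--     ("upto", "వరకు"), ("Upto", "వరకు"),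
--     ("\u2192", "|"), ("->", "|"),
-- ]
--
-- def telugu_tithi_full(tithi_raw, tz=""):
--     """Convert tithi string to Telugu, strip tz, use | as separator (single scan)."""
--     result = tithi_raw
--     if tz:
--         result = result.replace(f" {tz}", "")
--     out = []
--     i = 0
--     n = len(result)
--     while i < n:
--         for key, val in _PAIRS:
--             if result.startswith(key, i):
--                 out.append(val)
--                 i += len(key)
--                 break
--         else:
--             out.append(result[i])
--             i += 1
--     return "".join(out)
-- ===== Notes on version B (the rewrite author's own statement) =====
-- stated objective: alternative
-- what changed: B builds one combined table of (source, translation) pairs and does a single left-to-right scan emitting the first matching replacement at each position, instead of A's cascade of ~20 sequential full-string str.replace passes (valid because no two sources overlap and no translation contains a source).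
import Mathlib
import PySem

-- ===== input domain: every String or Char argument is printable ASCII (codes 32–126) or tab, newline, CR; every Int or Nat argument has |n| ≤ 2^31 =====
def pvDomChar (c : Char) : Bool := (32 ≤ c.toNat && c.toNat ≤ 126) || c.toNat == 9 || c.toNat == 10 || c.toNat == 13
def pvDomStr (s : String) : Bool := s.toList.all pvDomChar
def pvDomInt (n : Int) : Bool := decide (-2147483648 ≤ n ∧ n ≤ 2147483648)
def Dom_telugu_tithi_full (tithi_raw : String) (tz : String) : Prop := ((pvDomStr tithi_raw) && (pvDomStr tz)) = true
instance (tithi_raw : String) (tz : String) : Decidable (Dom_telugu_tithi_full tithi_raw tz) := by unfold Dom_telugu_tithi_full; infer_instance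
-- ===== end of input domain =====

-- B replaces A's cascade of ~20 sequential str.replace passes by one left-to-right scan over a
-- combined replacement table (alternative single-pass algorithm, same return value).

-- ===== PORT A =====
def TITHI_MAP : List (String × String) := [
  ("Ekadashi", "ఏకాదశి"), ("Dwadashi", "ద్వాదశి"),
  ("Trayodashi", "త్రయోదశి"), ("Chaturdashi", "చతుర్దశి"),
  ("Purnima", "పూర్ణిమ"), ("Amavasya", "అమావాస్య"),
  ("Pratipada", "పాడ్యమి"), ("Dwitiya", "విదియ"),
  ("Tritiya", "తదియ"), ("Chaturthi", "చవితి"),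
  ("Panchami", "పంచమి"), ("Shashthi", "షష్ఠి"),
  ("Saptami", "సప్తమి"), ("Ashtami", "అష్టమి"),
  ("Navami", "నవమి"), ("Dashami", "దశమి")]

def telugu_tithi_full (tithi_raw : String) (tz : String) : String :=
  let result := tithi_raw
  let result := if tz ≠ "" then PySem.Str.replace result (String.ofList (' ' :: tz.toList)) "" else result
  let result := TITHI_MAP.foldl (fun r p => PySem.Str.replace r p.1 p.2) result
  let result := PySem.Str.replace (PySem.Str.replace result "upto" "వరకు") "Upto" "వరకు"
  let result := PySem.Str.replace (PySem.Str.replace result "→" "|") "->" "|"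
  result

-- ===== PORT B =====
-- the combined replacement table of Source B (_PAIRS), as char lists
def REPLACEMENTS : List (List Char × List Char) :=
  (TITHI_MAP.map (fun p => (p.1.toList, p.2.toList))) ++
  [("upto".toList, "వరకు".toList), ("Upto".toList, "వరకు".toList),
   ("→".toList, "|".toList), ("->".toList, "|".toList)]

-- Source B's while/for loop: at each position emit the first matching pair's value (and skip its key),
-- otherwise copy the character
def scanRepl (ps : List (List Char × List Char)) : List Char → List Char
  | [] => []
  | c :: t =>
    match ps.find? (fun p => p.1.isPrefixOf (c :: t)) with
    | some q => q.2 ++ scanRepl ps (t.drop (q.1.length - 1))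
    | none => c :: scanRepl ps t
termination_by l => l.length
decreasing_by
  · simp only [List.length_drop, List.length_cons]; omega
  · simp only [List.length_cons]; omega

def telugu_tithi_full_alt (tithi_raw : String) (tz : String) : String :=
  let result := if tz ≠ "" then PySem.Str.replace tithi_raw (String.ofList (' ' :: tz.toList)) "" else tithi_raw
  String.ofList (scanRepl REPLACEMENTS result.toList)

-- ===== PRECONDITION & SPEC =====
def Spec_telugu_tithi_full (tithi_raw : String) (tz : String) (out : String) : Prop := out = telugu_tithi_full_alt tithi_raw tz
instance (tithi_raw : String) (tz : String) (out : String) : Decidable (Spec_telugu_tithi_full tithi_raw tz out) := by unfold Spec_telugu_tithi_full; infer_instance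

-- ===== CLAIM (what is proved, stated in full; the proofs are below) =====
def Claim_equal_telugu_tithi_full : Prop := ∀ (tithi_raw : String) (tz : String), Dom_telugu_tithi_full tithi_raw tz → Spec_telugu_tithi_full tithi_raw tz (telugu_tithi_full tithi_raw tz)

-- ===== LEMMAS AND PROOFS =====

-- a functional (fuel-free) reading of Python's str.replace (nonempty old), for reasoning
def replaceL (old new : List Char) : List Char → List Char
  | [] => []
  | c :: t =>
    if old.isPrefixOf (c :: t) then new ++ replaceL old new (t.drop (old.length - 1))
    else c :: replaceL old new t
termination_by l => l.length
decreasing_by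
  · simp only [List.length_drop, List.length_cons]; omega
  · simp only [List.length_cons]; omega

theorem replaceL_nil (old new : List Char) : replaceL old new [] = [] := by
  simp [replaceL]

theorem replaceL_pos (old new : List Char) (c : Char) (t : List Char)
    (h : old.isPrefixOf (c :: t)) :
    replaceL old new (c :: t) = new ++ replaceL old new (t.drop (old.length - 1)) := by
  rw [replaceL]; simp [h]

theorem replaceL_neg (old new : List Char) (c : Char) (t : List Char)
    (h : ¬ old.isPrefixOf (c :: t)) :
    replaceL old new (c :: t) = c :: replaceL old new t := by
  rw [replaceL]; simp [h]

theorem go_spec (old new : List Char) (hold : old ≠ []) :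
    ∀ (fuel : Nat) (l acc : List Char), l.length ≤ fuel →
      PySem.Chars.replace.go old new fuel l acc = acc.reverse ++ replaceL old new l := by
  intro fuel
  induction fuel with
  | zero =>
    intro l acc h
    have hl : l = [] := by
      cases l with
      | nil => rfl
      | cons c t => simp at h
    subst hl
    simp [PySem.Chars.replace.go, replaceL_nil]
  | succ n ih =>
    intro l acc h
    cases l with
    | nil => simp [PySem.Chars.replace.go, replaceL_nil]
    | cons c t =>
      rw [PySem.Chars.replace.go]
      by_cases hp : old.isPrefixOf (c :: t)
      · rw [if_pos hp]
        obtain ⟨m, hm⟩ : ∃ m, old.length = m + 1 := by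
          cases old with
          | nil => exact absurd rfl hold
          | cons a b => exact ⟨b.length, rfl⟩
        have hdrop : List.drop old.length (c :: t) = t.drop (old.length - 1) := by
          rw [hm]; simp
        rw [hdrop, ih _ _ (by simp only [List.length_drop] at *; simp at h; omega)]
        rw [replaceL_pos old new c t hp]
        simp
      · rw [if_neg hp, ih t (c :: acc) (by simp at h; omega), replaceL_neg old new c t hp]
        simp

theorem replace_eq (old new s : List Char) (hold : old ≠ []) :
    PySem.Chars.replace s old new = replaceL old new s := by
  unfold PySem.Chars.replace
  rw [if_neg (by simpa using hold)]
  simpa using go_spec old new hold s.length s [] le_rfl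

-- scanRepl equations
theorem scanRepl_nil (ps : List (List Char × List Char)) : scanRepl ps [] = [] := by
  simp [scanRepl]

theorem scanRepl_some (ps : List (List Char × List Char)) (c : Char) (t : List Char)
    (q : List Char × List Char)
    (h : ps.find? (fun p => p.1.isPrefixOf (c :: t)) = some q) :
    scanRepl ps (c :: t) = q.2 ++ scanRepl ps (t.drop (q.1.length - 1)) := by
  rw [scanRepl, h]

theorem scanRepl_none (ps : List (List Char × List Char)) (c : Char) (t : List Char)
    (h : ps.find? (fun p => p.1.isPrefixOf (c :: t)) = none) :
    scanRepl ps (c :: t) = c :: scanRepl ps t := by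
  rw [scanRepl, h]

theorem scanRepl_empty (l : List Char) : scanRepl [] l = l := by
  induction l with
  | nil => exact scanRepl_nil []
  | cons c t ih => rw [scanRepl_none [] c t rfl, ih]

-- separation of two keys: no occurrence of k can start at or strictly inside q
def KeySepB (k q : List Char) : Bool :=
  (List.range q.length).all (fun j => !(k.isPrefixOf (q.drop j)) && !((q.drop j).isPrefixOf k))

abbrev KeySep (k q : List Char) : Prop := KeySepB k q = true

theorem keySep_spec {k q : List Char} (h : KeySep k q) :
    ∀ j, j < q.length → ¬ k.isPrefixOf (q.drop j) ∧ ¬ (q.drop j).isPrefixOf k := by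
  unfold KeySep KeySepB at h
  rw [List.all_eq_true] at h
  intro j hj
  have := h j (List.mem_range.mpr hj)
  simp only [Bool.and_eq_true, Bool.not_eq_eq_eq_not, Bool.not_true] at this
  exact ⟨by simp [this.1], by simp [this.2]⟩

-- well-formedness of a replacement table: nonempty sides, values inert w.r.t. all keys,
-- and pairwise-separated keys
def Good (ps : List (List Char × List Char)) : Prop :=
  (∀ p ∈ ps, p.1 ≠ [] ∧ p.2 ≠ []) ∧
  (∀ p ∈ ps, ∀ q ∈ ps, ∀ c ∈ p.2, c ∉ q.1) ∧
  ps.Pairwise (fun p q => KeySep p.1 q.1 ∧ KeySep q.1 p.1)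

theorem prefix_split {r a b : List Char} (h : r.isPrefixOf (a ++ b)) :
    r.isPrefixOf a ∨ a.isPrefixOf r := by
  simp only [List.isPrefixOf_iff_prefix] at *
  exact List.prefix_or_prefix_of_prefix h (List.prefix_append a b)

theorem find?_ext {α : Type} (ps : List α) (f g : α → Bool) (h : ∀ r ∈ ps, f r = g r) :
    ps.find? f = ps.find? g := by
  induction ps with
  | nil => rfl
  | cons a l ih =>
    simp only [List.find?]
    rw [h a (List.mem_cons_self ..)]
    cases g a
    · exact ih fun r hr => h r (List.mem_cons_of_mem _ hr)
    · rfl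

-- if r avoids new's characters, a prefix-match of r on the output reflects to the input
theorem prefix_reflect (old new : List Char) (hnew : new ≠ []) :
    ∀ (n : Nat) (m r : List Char), m.length ≤ n → r ≠ [] → (∀ c ∈ r, c ∉ new) →
      r.isPrefixOf (replaceL old new m) → r.isPrefixOf m := by
  intro n
  induction n with
  | zero =>
    intro m r hm hr _ h
    cases m with
    | nil =>
      rw [replaceL_nil] at h
      cases r with
      | nil => exact absurd rfl hr
      | cons a b => simp [List.isPrefixOf] at h
    | cons c t => simp at hm
  | succ n ih =>
    intro m r hm hr hdisj h
    cases m with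
    | nil =>
      rw [replaceL_nil] at h
      cases r with
      | nil => exact absurd rfl hr
      | cons a b => simp [List.isPrefixOf] at h
    | cons c t =>
      by_cases hp : old.isPrefixOf (c :: t)
      · rw [replaceL_pos _ _ _ _ hp] at h
        rcases prefix_split h with h1 | h1
        · obtain ⟨c0, hc0⟩ : ∃ c0, c0 ∈ r := by
            cases r with
            | nil => exact absurd rfl hr
            | cons a b => exact ⟨a, List.mem_cons_self ..⟩
          exact absurd ((List.isPrefixOf_iff_prefix.mp h1).subset hc0) (hdisj c0 hc0)
        · obtain ⟨c0, hc0⟩ : ∃ c0, c0 ∈ new := by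
            cases new with
            | nil => exact absurd rfl hnew
            | cons a b => exact ⟨a, List.mem_cons_self ..⟩
          exact absurd hc0 (hdisj c0 ((List.isPrefixOf_iff_prefix.mp h1).subset hc0))
      · rw [replaceL_neg _ _ _ _ hp] at h
        cases r with
        | nil => exact absurd rfl hr
        | cons a r' =>
          rw [List.isPrefixOf_iff_prefix] at h
          obtain ⟨rfl, h2⟩ := List.cons_prefix_cons.mp h
          cases r' with
          | nil =>
            rw [List.isPrefixOf_iff_prefix]
            exact List.cons_prefix_cons.mpr ⟨rfl, List.nil_prefix⟩
          | cons b r'' =>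
            have hrec := ih t (b :: r'') (by simp at hm; omega) (by simp)
              (fun x hx => hdisj x (List.mem_cons_of_mem _ hx))
              (by rw [List.isPrefixOf_iff_prefix]; exact h2)
            rw [List.isPrefixOf_iff_prefix] at hrec ⊢
            exact List.cons_prefix_cons.mpr ⟨rfl, hrec⟩

-- replaceL walks untouched past a prefix q in which old never matches
theorem skip_prefix (old new : List Char) :
    ∀ (q m : List Char), q.isPrefixOf m → (∀ j, j < q.length → ¬ old.isPrefixOf (m.drop j)) →
      replaceL old new m = q ++ replaceL old new (m.drop q.length) := by
  intro q
  induction q with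
  | nil => intro m _ _; simp
  | cons a q' ih =>
    intro m hq h
    cases m with
    | nil => rw [List.isPrefixOf_iff_prefix] at hq; simp at hq
    | cons c t =>
      rw [List.isPrefixOf_iff_prefix] at hq
      obtain ⟨rfl, hq2⟩ := List.cons_prefix_cons.mp hq
      have h0 : ¬ old.isPrefixOf (a :: t) := by simpa using h 0 (by simp)
      rw [replaceL_neg _ _ _ _ h0]
      rw [ih t (List.isPrefixOf_iff_prefix.mpr hq2)
        (fun j hj => by simpa using h (j + 1) (by simp; omega))]
      simp

-- a scan walks untouched past a block whose characters occur in no key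
theorem inert_scan (ps : List (List Char × List Char))
    (hkeys : ∀ p ∈ ps, p.1 ≠ []) :
    ∀ (v : List Char), (∀ c ∈ v, ∀ p ∈ ps, c ∉ p.1) →
      ∀ x, scanRepl ps (v ++ x) = v ++ scanRepl ps x := by
  intro v
  induction v with
  | nil => intro _ x; simp
  | cons d v' ih =>
    intro hdisj x
    have hnone : ps.find? (fun p => p.1.isPrefixOf (d :: (v' ++ x))) = none := by
      rw [List.find?_eq_none]
      intro p hp
      simp only [Bool.not_eq_true]
      cases hp1 : p.1 with
      | nil => exact absurd hp1 (hkeys p hp)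
      | cons e k =>
        rw [Bool.eq_false_iff]
        intro hpref
        rw [List.isPrefixOf_iff_prefix] at hpref
        obtain ⟨rfl, -⟩ := List.cons_prefix_cons.mp hpref
        exact hdisj e (List.mem_cons_self ..) p hp (by rw [hp1]; exact List.mem_cons_self ..)
    rw [List.cons_append, scanRepl_none _ _ _ hnone,
      ih (fun c hc => hdisj c (List.mem_cons_of_mem _ hc)) x]
    rfl

theorem step_lemma (p : List Char × List Char) (ps : List (List Char × List Char))
    (hGood : Good (p :: ps)) :
    ∀ l, scanRepl ps (replaceL p.1 p.2 l) = scanRepl (p :: ps) l := by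
  obtain ⟨hne, hinert, hpair⟩ := hGood
  have hk : p.1 ≠ [] := (hne p (List.mem_cons_self ..)).1
  have hv : p.2 ≠ [] := (hne p (List.mem_cons_self ..)).2
  have hpairhead : ∀ q ∈ ps, KeySep p.1 q.1 ∧ KeySep q.1 p.1 := (List.pairwise_cons.mp hpair).1
  have hpairtail : ps.Pairwise (fun a b => KeySep a.1 b.1 ∧ KeySep b.1 a.1) :=
    (List.pairwise_cons.mp hpair).2
  have hsym : ∀ r ∈ ps, ∀ s ∈ ps, r ≠ s → KeySep r.1 s.1 ∧ KeySep s.1 r.1 :=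
    hpairtail.forall (fun _ _ h => ⟨h.2, h.1⟩)
  suffices H : ∀ (n : Nat) (l : List Char), l.length ≤ n →
      scanRepl ps (replaceL p.1 p.2 l) = scanRepl (p :: ps) l from
    fun l => H l.length l le_rfl
  intro n
  induction n with
  | zero =>
    intro l h
    have hl : l = [] := by
      cases l with
      | nil => rfl
      | cons c t => simp at h
    subst hl
    rw [replaceL_nil, scanRepl_nil, scanRepl_nil]
  | succ n ih =>
    intro l hlen
    cases l with
    | nil => rw [replaceL_nil, scanRepl_nil, scanRepl_nil]
    | cons c t =>
      by_cases hp1 : p.1.isPrefixOf (c :: t)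
      · rw [replaceL_pos _ _ _ _ hp1]
        rw [inert_scan ps (fun q hq => (hne q (List.mem_cons_of_mem _ hq)).1) p.2
          (fun ch hch q hq hchq =>
            hinert p (List.mem_cons_self ..) q (List.mem_cons_of_mem _ hq) ch hch hchq) _]
        have hfind : (p :: ps).find? (fun q => q.1.isPrefixOf (c :: t)) = some p :=
          List.find?_cons_of_pos (by simpa using hp1)
        rw [scanRepl_some _ _ _ _ hfind]
        congr 1
        exact ih _ (by simp only [List.length_drop] at *; simp at hlen ⊢; omega)
      · have hrw : replaceL p.1 p.2 (c :: t) = c :: replaceL p.1 p.2 t :=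
          replaceL_neg _ _ _ _ hp1
        rcases hfq : ps.find? (fun q => q.1.isPrefixOf (c :: t)) with _ | q
        · -- no key matches here
          have hfind : (p :: ps).find? (fun q => q.1.isPrefixOf (c :: t)) = none := by
            rw [List.find?_cons_of_neg (by simpa using hp1)]; exact hfq
          rw [scanRepl_none _ _ _ hfind, hrw]
          have hnone2 : ps.find? (fun q => q.1.isPrefixOf (c :: replaceL p.1 p.2 t)) = none := by
            rw [List.find?_eq_none] at hfq ⊢
            intro q hq hpref
            apply hfq q hq
            have := prefix_reflect p.1 p.2 hv (c :: t).length (c :: t) q.1 le_rfl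
              (hne q (List.mem_cons_of_mem _ hq)).1
              (fun ch hch hchv =>
                hinert p (List.mem_cons_self ..) q (List.mem_cons_of_mem _ hq) ch hchv hch)
              (by rw [replaceL_neg _ _ _ _ hp1]; simpa using hpref)
            simpa using this
          rw [scanRepl_none _ _ _ hnone2]
          rw [ih t (by simp at hlen; omega)]
        · -- a later key q matches here
          have hqmem : q ∈ ps := List.mem_of_find?_eq_some hfq
          have hqpref : q.1.isPrefixOf (c :: t) := by simpa using List.find?_some hfq
          have hqne : q.1 ≠ [] := (hne q (List.mem_cons_of_mem _ hqmem)).1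
          have hqpos : 0 < q.1.length := List.length_pos_iff.mpr hqne
          have hsep : KeySep p.1 q.1 := (hpairhead q hqmem).1
          obtain ⟨stail, hs'⟩ := List.isPrefixOf_iff_prefix.mp hqpref
          set Z := replaceL p.1 p.2 ((c :: t).drop q.1.length) with hZ
          have hA : replaceL p.1 p.2 (c :: t) = q.1 ++ Z := by
            rw [hZ]
            apply skip_prefix _ _ _ _ hqpref
            intro j hj
            have hsplit : (c :: t).drop j = q.1.drop j ++ (c :: t).drop q.1.length := by
              conv_lhs => rw [← hs']
              conv_rhs => rw [← hs']
              rw [List.drop_append_of_le_length (le_of_lt hj), List.drop_left]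
            rw [hsplit]
            intro hpref
            rcases prefix_split hpref with h1 | h1
            · exact (keySep_spec hsep j hj).1 h1
            · exact (keySep_spec hsep j hj).2 h1
          obtain ⟨q1', hq1'⟩ : ∃ q1', q.1 = c :: q1' := by
            cases hql : q.1 with
            | nil => exact absurd hql hqne
            | cons a b =>
              refine ⟨b, ?_⟩
              rw [hql] at hqpref
              rw [List.isPrefixOf_iff_prefix] at hqpref
              obtain ⟨h1, -⟩ := List.cons_prefix_cons.mp hqpref
              rw [h1]
          have hshape : q.1 ++ Z = c :: (q1' ++ Z) := by rw [hq1']; rfl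
          have hfind2 : ps.find? (fun r => r.1.isPrefixOf (q.1 ++ Z)) = some q := by
            rw [find?_ext ps _ (fun r => r.1.isPrefixOf (c :: t))]
            · exact hfq
            · intro r hr
              by_cases hrq : r = q
              · subst hrq
                rw [Bool.eq_iff_iff]
                constructor
                · intro _; exact hqpref
                · intro _
                  rw [List.isPrefixOf_iff_prefix]
                  exact List.prefix_append _ _
              · have hsep2 : KeySep r.1 q.1 ∧ KeySep q.1 r.1 := hsym r hr q hqmem hrq
                rw [Bool.eq_iff_iff]
                constructor
                · intro hpref
                  rcases prefix_split hpref with h1 | h1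
                  · rw [List.isPrefixOf_iff_prefix] at h1 hqpref ⊢
                    exact h1.trans hqpref
                  · exact absurd h1 ((keySep_spec hsep2.1 0 hqpos).2 ∘ (by simpa using ·))
                · intro hpref
                  have hcomp := List.prefix_or_prefix_of_prefix
                    (List.isPrefixOf_iff_prefix.mp hpref) (List.isPrefixOf_iff_prefix.mp hqpref)
                  rcases hcomp with h1 | h1
                  · rw [List.isPrefixOf_iff_prefix]
                    exact h1.trans (List.prefix_append _ _)
                  · exact absurd (List.isPrefixOf_iff_prefix.mpr h1)
                      (by simpa using (keySep_spec hsep2.1 0 hqpos).2)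
          rw [hshape] at hfind2
          rw [hA, hshape]
          rw [scanRepl_some ps c (q1' ++ Z) q hfind2]
          have hdropZ : (q1' ++ Z).drop (q.1.length - 1) = Z := by
            have hlq : q.1.length - 1 = q1'.length := by rw [hq1']; simp
            rw [hlq, List.drop_left]
          rw [hdropZ]
          have hfind3 : (p :: ps).find? (fun r => r.1.isPrefixOf (c :: t)) = some q := by
            rw [List.find?_cons_of_neg (by simpa using hp1)]; exact hfq
          rw [scanRepl_some _ _ _ _ hfind3]
          congr 1
          have hteq : t.drop (q.1.length - 1) = (c :: t).drop q.1.length := by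
            rw [hq1']; simp
          rw [hteq]
          exact ih _ (by simp only [List.length_drop] at *; simp at hlen ⊢; omega)

theorem foldl_eq_scan (ps : List (List Char × List Char)) (h : Good ps) :
    ∀ l, ps.foldl (fun s p => replaceL p.1 p.2 s) l = scanRepl ps l := by
  induction ps with
  | nil => intro l; simp [scanRepl_empty]
  | cons p ps ih =>
    intro l
    have htail : Good ps := by
      obtain ⟨h1, h2, h3⟩ := h
      exact ⟨fun q hq => h1 q (List.mem_cons_of_mem _ hq),
             fun a ha b hb => h2 a (List.mem_cons_of_mem _ ha) b (List.mem_cons_of_mem _ hb),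
             h3.of_cons⟩
    rw [List.foldl_cons, ih htail, step_lemma p ps h]

def pairSepB : List (List Char × List Char) → Bool
  | [] => true
  | p :: ps => ps.all (fun q => KeySepB p.1 q.1 && KeySepB q.1 p.1) && pairSepB ps

theorem pairSepB_pairwise (ps : List (List Char × List Char)) (h : pairSepB ps = true) :
    ps.Pairwise (fun p q => KeySep p.1 q.1 ∧ KeySep q.1 p.1) := by
  induction ps with
  | nil => exact List.Pairwise.nil
  | cons p ps ih =>
    rw [pairSepB, Bool.and_eq_true] at h
    refine List.Pairwise.cons (fun q hq => ?_) (ih h.2)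
    have := List.all_eq_true.mp h.1 q hq
    rw [Bool.and_eq_true] at this
    exact ⟨this.1, this.2⟩

set_option maxRecDepth 4000 in
theorem good_repl : Good REPLACEMENTS := by
  have h1 : (REPLACEMENTS.all (fun p => !p.1.isEmpty && !p.2.isEmpty)) = true := rfl
  have h2 : (REPLACEMENTS.all (fun p =>
      REPLACEMENTS.all (fun q => p.2.all (fun c => !(q.1.contains c))))) = true := rfl
  have h3 : pairSepB REPLACEMENTS = true := rfl
  refine ⟨fun p hp => ?_, fun p hp q hq c hc => ?_, pairSepB_pairwise _ h3⟩
  · have := List.all_eq_true.mp h1 p hp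
    rw [Bool.and_eq_true] at this
    constructor
    · simpa [List.isEmpty_iff] using this.1
    · simpa [List.isEmpty_iff] using this.2
  · have ha := List.all_eq_true.mp h2 p hp
    have hb := List.all_eq_true.mp ha q hq
    have hc2 := List.all_eq_true.mp hb c hc
    simpa using hc2

theorem foldl_bridge (M : List (String × String)) :
    ∀ (s : String), (∀ p ∈ M, p.1.toList ≠ []) →
      (M.foldl (fun r p => PySem.Str.replace r p.1 p.2) s).toList =
      List.foldl (fun r p => replaceL p.1 p.2 r) s.toList
        (M.map fun p => (p.1.toList, p.2.toList)) := by
  induction M with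
  | nil => intro s _; simp
  | cons p M ih =>
    intro s h
    rw [List.map_cons, List.foldl_cons, List.foldl_cons,
        ih _ (fun q hq => h q (List.mem_cons_of_mem _ hq))]
    congr 1
    rw [PySem.Str.toList_replace, replace_eq _ _ _ (h p (List.mem_cons_self ..))]

theorem main_chain (s : String) :
    PySem.Str.replace (PySem.Str.replace (PySem.Str.replace (PySem.Str.replace
        (TITHI_MAP.foldl (fun r p => PySem.Str.replace r p.1 p.2) s)
        "upto" "వరకు") "Upto" "వరకు") "→" "|") "->" "|"
      = String.ofList (scanRepl REPLACEMENTS s.toList) := by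
  apply String.toList_inj.mp
  rw [String.toList_ofList]
  rw [PySem.Str.toList_replace, PySem.Str.toList_replace, PySem.Str.toList_replace,
      PySem.Str.toList_replace]
  rw [replace_eq _ _ _ (by decide), replace_eq _ _ _ (by decide),
      replace_eq _ _ _ (by decide), replace_eq _ _ _ (by decide)]
  rw [foldl_bridge TITHI_MAP s (by decide), ← foldl_eq_scan REPLACEMENTS good_repl]
  simp only [REPLACEMENTS, TITHI_MAP, List.map_cons, List.map_nil, List.foldl_append,
    List.foldl_cons, List.foldl_nil]

-- ===== VERDICT (by name: the statement is the Claim_ definition above) =====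
theorem telugu_tithi_full_spec : Claim_equal_telugu_tithi_full := by
  intro tithi_raw tz _
  unfold Spec_telugu_tithi_full telugu_tithi_full telugu_tithi_full_alt
  exact main_chain _
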